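-- pv_equiv track=rewrite | github.com/Chadiboulos/movie-recommander | airflow/dags/train_recofims_model_dag.py | get_list_param_from_param_grid
-- ===== SOURCE A (Python) =====
-- import itertools
--
-- def get_list_param_from_param_grid(grid_param):
--
--     params = list()
--     for k in grid_param:
--         params.append(grid_param[k])
--     list_param = list()
--     for param in list(itertools.product(*params)):
--         list_param.append(dict(zip(grid_param.keys(), param)))
--     return list_param
-- ===== SOURCE B (Python) =====
-- def get_list_param_from_param_grid(grid_param):
--     result = [{}]
--     for k, values in grid_param.items():
--         result = [{**partial, k: v} for partial in result for v in values]
--     return result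
-- ===== Notes on version B (the rewrite author's own statement) =====
-- stated objective: idiomatic
-- what changed: Replaces the collect-value-lists + itertools.product + dict(zip(...)) pipeline with a single incremental fold that extends a list of partial dicts key by key (later keys vary fastest, reproducing product order).
import Mathlib
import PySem

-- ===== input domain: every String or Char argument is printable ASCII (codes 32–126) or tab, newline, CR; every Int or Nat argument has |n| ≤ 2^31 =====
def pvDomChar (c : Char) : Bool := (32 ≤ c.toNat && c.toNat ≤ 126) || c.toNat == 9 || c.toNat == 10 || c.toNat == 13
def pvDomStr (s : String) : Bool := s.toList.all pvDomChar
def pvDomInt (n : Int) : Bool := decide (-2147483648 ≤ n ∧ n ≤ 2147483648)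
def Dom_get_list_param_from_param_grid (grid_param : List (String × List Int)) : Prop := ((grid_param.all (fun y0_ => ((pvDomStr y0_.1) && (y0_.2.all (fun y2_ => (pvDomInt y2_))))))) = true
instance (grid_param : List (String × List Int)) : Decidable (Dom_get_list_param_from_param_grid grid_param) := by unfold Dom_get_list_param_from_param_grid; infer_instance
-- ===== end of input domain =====

-- B replaces itertools.product + dict(zip(...)) by an incremental fold of partial dicts (idiomatic; no speed claim).

-- ===== PORT A =====
-- hand port of itertools.product over a list of lists (exact: first iterable varies slowest)
def pvProduct : List (List Int) → List (List Int)
  | [] => [[]]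
  | vs :: rest => vs.flatMap (fun v => (pvProduct rest).map (fun t => v :: t))

def get_list_param_from_param_grid (grid_param : List (String × List Int)) : List (List (String × Int)) :=
  let d := PySem.Dict.mk grid_param
  -- params = []; for k in grid_param: params.append(grid_param[k])   (k ranges over the dict's keys;
  -- grid_param[k] never misses here, so the KeyError branch of get? is unreachable)
  let params := d.keys.foldl (fun acc k => acc ++ [(d.get? k).getD []]) []
  -- list_param = []; for param in product(*params): list_param.append(dict(zip(grid_param.keys(), param)))
  (pvProduct params).foldl
    (fun acc param =>
      acc ++ [((d.keys.zip param).foldl (fun dd kv => dd.insert kv.1 kv.2) PySem.Dict.empty).items])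
    []

-- ===== PORT B =====
def get_list_param_from_param_grid_alt (grid_param : List (String × List Int)) : List (List (String × Int)) :=
  -- result = [{}]; for k, values in grid_param.items(): result = [{**partial, k: v} for partial in result for v in values]
  grid_param.foldl
    (fun result kv =>
      result.flatMap (fun p => kv.2.map (fun v => ((PySem.Dict.mk p).insert kv.1 v).items)))
    [[]]

-- ===== PRECONDITION & SPEC =====
-- Pre_ requires distinct keys: the Python argument is a dict, and an association list with duplicate
-- keys encodes no Python dict input at all, so nothing is excluded that A accepts.
def Pre_get_list_param_from_param_grid (grid_param : List (String × List Int)) : Prop :=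
  (grid_param.map Prod.fst).Nodup
instance (grid_param : List (String × List Int)) : Decidable (Pre_get_list_param_from_param_grid grid_param) := by unfold Pre_get_list_param_from_param_grid; infer_instance

def pvWitness_get_list_param_from_param_grid : (List (String × List Int)) :=
  [("a", [1, 2]), ("b", [3])]

def Spec_get_list_param_from_param_grid (grid_param : List (String × List Int)) (out : List (List (String × Int))) : Prop := out = get_list_param_from_param_grid_alt grid_param
instance (grid_param : List (String × List Int)) (out : List (List (String × Int))) : Decidable (Spec_get_list_param_from_param_grid grid_param out) := by unfold Spec_get_list_param_from_param_grid; infer_instance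

-- ===== CLAIM (what is proved, stated in full; the proofs are below) =====
def Claim_equal_get_list_param_from_param_grid : Prop := ∀ (grid_param : List (String × List Int)), Dom_get_list_param_from_param_grid grid_param → Pre_get_list_param_from_param_grid grid_param → Spec_get_list_param_from_param_grid grid_param (get_list_param_from_param_grid grid_param)

-- ===== LEMMAS AND PROOFS =====

-- the common normal form: the Cartesian product of the grid as association lists, keys in order,
-- later keys varying fastest
def pvCart : List (String × List Int) → List (List (String × Int))
  | [] => [[]]
  | (k, vs) :: rest => vs.flatMap (fun v => (pvCart rest).map (fun r => (k, v) :: r))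

theorem pvProduct_length {ps : List (List Int)} {t : List Int}
    (ht : t ∈ pvProduct ps) : t.length = ps.length := by
  induction ps generalizing t with
  | nil => simp [pvProduct] at ht; simp [ht]
  | cons vs rest ih =>
    simp only [pvProduct, List.mem_flatMap, List.mem_map] at ht
    obtain ⟨v, -, t', ht', rfl⟩ := ht
    simp [ih ht']

theorem pvProduct_zip (l : List (String × List Int)) :
    (pvProduct (l.map Prod.snd)).map (fun t => (l.map Prod.fst).zip t) = pvCart l := by
  induction l with
  | nil => simp [pvProduct, pvCart]
  | cons kv rest ih =>
    obtain ⟨k, vs⟩ := kv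
    simp only [pvCart, List.map_cons, pvProduct, List.map_flatMap, List.map_map]
    refine List.flatMap_congr (fun v _ => ?_)
    rw [← ih, List.map_map]
    exact List.map_congr_left (fun t _ => by simp [List.zip_cons_cons])

theorem dict_of_zip (keys : List String) (t : List Int)
    (hnd : keys.Nodup) (hlen : t.length = keys.length) :
    ((keys.zip t).foldl (fun dd kv => dd.insert kv.1 kv.2) PySem.Dict.empty).items
      = keys.zip t := by
  have hfst : (keys.zip t).map Prod.fst = keys := by
    rw [List.map_fst_zip]; omega
  have := PySem.Dict.items_foldl_insert_fresh (l := keys.zip t)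
      (k := Prod.fst) (v := Prod.snd) (d := PySem.Dict.empty)
      (by intro a _; simp [PySem.Dict.contains_empty])
      (by rw [hfst]; exact hnd)
  simpa [PySem.Dict.empty] using this

theorem portA_eq_cart (l : List (String × List Int))
    (hnd : (l.map Prod.fst).Nodup) :
    get_list_param_from_param_grid l = pvCart l := by
  unfold get_list_param_from_param_grid
  simp only [PySem.List.foldl_append_singleton_eq_map, List.nil_append]
  have hkeys : (PySem.Dict.mk l).keys = l.map Prod.fst := by simp [PySem.Dict.keys]
  have hnd' : (PySem.Dict.mk l).keys.Nodup := by rw [hkeys]; exact hnd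
  have hparams : ((PySem.Dict.mk l).keys.map (fun k => ((PySem.Dict.mk l).get? k).getD []))
      = l.map Prod.snd := by
    have h1 : ∀ k, ((PySem.Dict.mk l).get? k).getD [] = (PySem.Dict.mk l).getD k [] :=
      fun k => (PySem.Dict.getD_eq_get?_getD _ _ _).symm
    calc (PySem.Dict.mk l).keys.map (fun k => ((PySem.Dict.mk l).get? k).getD [])
        = (PySem.Dict.mk l).keys.map (fun k => (PySem.Dict.mk l).getD k []) := by
          exact List.map_congr_left (fun k _ => h1 k)
      _ = (PySem.Dict.mk l).values := (PySem.Dict.values_eq_map_keys _ hnd' _).symm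
      _ = l.map Prod.snd := by simp [PySem.Dict.values]
  rw [hparams, hkeys]
  rw [List.map_congr_left (l := pvProduct (l.map Prod.snd))
        (f := fun t => (((l.map Prod.fst).zip t).foldl (fun dd kv => dd.insert kv.1 kv.2) PySem.Dict.empty).items)
        (g := fun t => (l.map Prod.fst).zip t)
        (fun t ht => dict_of_zip _ _ hnd (by rw [pvProduct_length ht]; simp))]
  exact pvProduct_zip l

theorem portB_fold (l : List (String × List Int)) (acc : List (List (String × Int)))
    (hnd : (l.map Prod.fst).Nodup)
    (hdisj : ∀ p ∈ acc, ∀ k ∈ l.map Prod.fst, k ∉ p.map Prod.fst) :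
    l.foldl (fun result kv =>
        result.flatMap (fun p => kv.2.map (fun v => ((PySem.Dict.mk p).insert kv.1 v).items)))
      acc
    = acc.flatMap (fun p => (pvCart l).map (fun r => p ++ r)) := by
  induction l generalizing acc with
  | nil => simp [pvCart]
  | cons kv rest ih =>
    obtain ⟨k, vs⟩ := kv
    simp only [List.map_cons, List.nodup_cons] at hnd
    have hstep : acc.flatMap (fun p => vs.map (fun v => ((PySem.Dict.mk p).insert k v).items))
        = acc.flatMap (fun p => vs.map (fun v => p ++ [(k, v)])) := by
      refine List.flatMap_congr (fun p hp => ?_)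
      refine List.map_congr_left (fun v _ => ?_)
      have hc : (PySem.Dict.mk p).contains k = false := by
        have := hdisj p hp k (by simp)
        simp [PySem.Dict.contains_eq_decide_mem_keys, PySem.Dict.keys, this]
      simpa using PySem.Dict.items_insert_of_not_contains (PySem.Dict.mk p) v hc
    simp only [List.foldl_cons, hstep]
    rw [ih _ hnd.2]
    · rw [List.flatMap_assoc]
      simp only [pvCart]
      refine List.flatMap_congr (fun p _ => ?_)
      simp [List.flatMap_map, List.map_flatMap, List.map_map, Function.comp_def,
            List.append_assoc]
    · intro p' hp' k' hk'
      simp only [List.mem_flatMap, List.mem_map] at hp'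
      obtain ⟨p, hp, v, -, rfl⟩ := hp'
      simp only [List.map_append, List.mem_append]
      rintro (h | h)
      · exact hdisj p hp k' (by simp [hk']) h
      · simp at h
        exact hnd.1 (h ▸ hk')

theorem portB_eq_cart (l : List (String × List Int))
    (hnd : (l.map Prod.fst).Nodup) :
    get_list_param_from_param_grid_alt l = pvCart l := by
  unfold get_list_param_from_param_grid_alt
  rw [portB_fold l [[]] hnd (by simp)]
  simp

-- ===== VERDICT (by name: the statement is the Claim_ definition above) =====
theorem get_list_param_from_param_grid_spec : Claim_equal_get_list_param_from_param_grid := by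
  intro grid_param _ hpre
  unfold Spec_get_list_param_from_param_grid
  rw [portA_eq_cart grid_param hpre, portB_eq_cart grid_param hpre]
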